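-- pv_equiv track=rewrite | github.com/Mahmoudkhaled225/boyer-moore | main.py | smallLeftPrimeArray
-- ===== SOURCE A (Python) =====
-- def smallLeftPrimeArray(arr):
--     n = len(arr)
--     small_lp = [0] * n
--     for i in range(n):
--         if (arr[i] == i + 1):  # prefix matching a suffix
--             small_lp[n - i - 1] = i + 1
--     for i in range(n - 2, -1, -1):  # "smear" them out to the left
--         if (small_lp[i] == 0):
--             small_lp[i] = small_lp[i + 1]
--     return small_lp
-- ===== SOURCE B (Python) =====
-- def smallLeftPrimeArray(arr):
--     # One forward pass: position i of arr corresponds to output slot n-1-i,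
--     # and the left-smear of A is exactly a running carry of the latest match.
--     out = []
--     carry = 0
--     for i, v in enumerate(arr):
--         if v == i + 1:
--             carry = i + 1
--         out.append(carry)
--     out.reverse()
--     return out
-- ===== Notes on version B (the rewrite author's own statement) =====
-- stated objective: simpler
-- what changed: Replaces A's place-then-smear pair of passes (scatter matches into a zero array, then a second reverse pass copying the right neighbour into zeros) with a single forward pass over enumerate(arr) threading a running carry of the latest match, reversed at the end.
import Mathlib
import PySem

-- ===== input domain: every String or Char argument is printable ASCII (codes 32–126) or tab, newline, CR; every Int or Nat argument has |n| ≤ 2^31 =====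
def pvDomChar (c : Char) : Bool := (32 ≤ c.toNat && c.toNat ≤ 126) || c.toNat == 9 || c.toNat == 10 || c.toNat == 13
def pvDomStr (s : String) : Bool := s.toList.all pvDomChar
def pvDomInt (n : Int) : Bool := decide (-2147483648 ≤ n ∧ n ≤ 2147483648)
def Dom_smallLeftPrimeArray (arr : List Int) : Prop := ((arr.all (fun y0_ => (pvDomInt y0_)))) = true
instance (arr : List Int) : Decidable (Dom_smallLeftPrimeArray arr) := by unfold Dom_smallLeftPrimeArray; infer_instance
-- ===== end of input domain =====

-- B replaces A's two passes (scatter matches, then smear zeros leftwards) by a single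
-- forward pass threading a running carry, reversed at the end; objective: simpler.

-- ===== PORT A =====
-- Both loops index with values that are provably in range and nonnegative
-- (i ∈ range(n), i ∈ range(n-2,-1,-1)), so list indexing is ported with List.getD/List.set.
def smallLeftPrimeArray (arr : List Int) : List Int :=
  let n := arr.length
  let sl0 := List.replicate n (0 : Int)
  -- for i in range(n): if arr[i] == i+1: small_lp[n-i-1] = i+1
  let sl1 := (List.range n).foldl
    (fun sl i => if arr.getD i 0 = (i : Int) + 1 then sl.set (n - i - 1) ((i : Int) + 1) else sl) sl0
  -- for i in range(n-2,-1,-1): if small_lp[i]==0: small_lp[i] = small_lp[i+1]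
  ((List.range (n - 1)).reverse).foldl
    (fun sl i => if sl.getD i 0 = 0 then sl.set i (sl.getD (i + 1) 0) else sl) sl1

-- ===== PORT B =====
def smallLeftPrimeArray_alt (arr : List Int) : List Int :=
  -- for i, v in enumerate(arr): if v == i+1: carry = i+1; out.append(carry); then out.reverse()
  let st := (PySem.List.enumerate arr 0).foldl
    (fun (st : Int × List Int) iv =>
      let carry := if iv.2 = iv.1 + 1 then iv.1 + 1 else st.1
      (carry, st.2 ++ [carry])) ((0 : Int), ([] : List Int))
  st.2.reverse

-- ===== PRECONDITION & SPEC =====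
def Spec_smallLeftPrimeArray (arr : List Int) (out : List Int) : Prop := out = smallLeftPrimeArray_alt arr
instance (arr : List Int) (out : List Int) : Decidable (Spec_smallLeftPrimeArray arr out) := by unfold Spec_smallLeftPrimeArray; infer_instance

-- ===== CLAIM (what is proved, stated in full; the proofs are below) =====
def Claim_equal_smallLeftPrimeArray : Prop := ∀ (arr : List Int), Dom_smallLeftPrimeArray arr → Spec_smallLeftPrimeArray arr (smallLeftPrimeArray arr)

-- ===== LEMMAS AND PROOFS =====

-- forward scan with carry, the recursion underlying B's loop
def scanGo : List Int → Int → Int → List Int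
  | [], _, _ => []
  | v :: t, i, c =>
      (if v = i + 1 then i + 1 else c) :: scanGo t (i + 1) (if v = i + 1 then i + 1 else c)

theorem scanGo_foldl (l : List Int) : ∀ (i c : Int) (out : List Int),
    ((PySem.List.enumerate l i).foldl
      (fun (st : Int × List Int) iv =>
        let carry := if iv.2 = iv.1 + 1 then iv.1 + 1 else st.1
        (carry, st.2 ++ [carry])) (c, out)).2
    = out ++ scanGo l i c := by
  induction l with
  | nil => intro i c out; simp [PySem.List.enumerate_nil, scanGo]
  | cons v t ih =>
      intro i c out
      simp only [PySem.List.enumerate_cons, List.foldl_cons, scanGo]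
      by_cases h : v = i + 1 <;> simp [h, ih, List.append_assoc]

theorem alt_eq_scanGo (arr : List Int) :
    smallLeftPrimeArray_alt arr = (scanGo arr 0 0).reverse := by
  show ((PySem.List.enumerate arr 0).foldl
      (fun (st : Int × List Int) iv =>
        let carry := if iv.2 = iv.1 + 1 then iv.1 + 1 else st.1
        (carry, st.2 ++ [carry])) ((0 : Int), ([] : List Int))).2.reverse
    = (scanGo arr 0 0).reverse
  rw [scanGo_foldl]
  simp

theorem length_scanGo (l : List Int) : ∀ i c, (scanGo l i c).length = l.length := by
  induction l with
  | nil => intro i c; rfl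
  | cons v t ih => intro i c; simp [scanGo, ih]

theorem scanGo_getD_zero (v : Int) (t : List Int) (i c : Int) :
    (scanGo (v :: t) i c).getD 0 0 = if v = i + 1 then i + 1 else c := by
  simp [scanGo]

theorem scanGo_getD_succ (l : List Int) : ∀ (i c : Int) (k : Nat), k + 1 < l.length →
    (scanGo l i c).getD (k + 1) 0
      = if l.getD (k + 1) 0 = i + k + 2 then i + k + 2 else (scanGo l i c).getD k 0 := by
  induction l with
  | nil => intro i c k h; simp at h
  | cons v t ih =>
      intro i c k h
      simp only [List.length_cons] at h
      match k with
      | 0 =>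
          match t, h with
          | w :: u, _ =>
            simp only [scanGo, List.getD_cons_succ, List.getD_cons_zero]
            have e : i + 1 + 1 = i + ((0 : Nat) : Int) + 2 := by push_cast; ring
            rw [e]
      | k + 1 =>
          simp only [scanGo, List.getD_cons_succ]
          rw [ih (i + 1) _ k (by omega)]
          have : i + 1 + ↑k + 2 = i + ↑(k + 1) + 2 := by push_cast; ring
          rw [this]

-- right-to-left smear value: Rf s j d reads s[j], s[j+1], … taking the first nonzero,
-- falling back to the raw s[j+d]
def Rf (s : List Int) : Nat → Nat → Int
  | j, 0 => s.getD j 0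
  | j, d + 1 => if s.getD j 0 ≠ 0 then s.getD j 0 else Rf s (j + 1) d

theorem foldl_length {β : Type} (step : List Int → β → List Int)
    (h : ∀ s i, (step s i).length = s.length) :
    ∀ (L : List β) (s : List Int), (L.foldl step s).length = s.length := by
  intro L
  induction L with
  | nil => intro s; rfl
  | cons x t ih => intro s; simp [List.foldl_cons, ih, h]

theorem getD_set_ne (s : List Int) (m j : Nat) (x : Int) (h : j ≠ m) :
    (s.set m x).getD j 0 = s.getD j 0 := by
  rw [List.getD_eq_getElem?_getD, List.getD_eq_getElem?_getD, List.getElem?_set_ne (by omega)]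

theorem getD_set_self (s : List Int) (m : Nat) (x : Int) :
    (s.set m x).getD m 0 = if m < s.length then x else s.getD m 0 := by
  by_cases h : m < s.length
  · rw [if_pos h, List.getD_eq_getElem _ _ (by simpa using h), List.getElem_set_self]
  · rw [if_neg h, List.set_eq_of_length_le (by omega)]

theorem getD_ge_length (s : List Int) (j : Nat) (h : s.length ≤ j) : s.getD j 0 = 0 := by
  simp [List.getD_eq_getElem?_getD, List.getElem?_eq_none (by omega : s.length ≤ j)]

-- characterisation of A's first pass
theorem pass1_getD (arr : List Int) : ∀ (m : Nat), m ≤ arr.length → ∀ (j : Nat), j < arr.length →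
    ((List.range m).foldl
      (fun sl i => if arr.getD i 0 = (i : Int) + 1 then sl.set (arr.length - i - 1) ((i : Int) + 1) else sl)
      (List.replicate arr.length (0 : Int))).getD j 0
    = if arr.length - m ≤ j ∧ arr.getD (arr.length - 1 - j) 0 = ((arr.length - j : Nat) : Int)
      then ((arr.length - j : Nat) : Int) else 0 := by
  intro m
  induction m with
  | zero =>
      intro _ j hj
      simp only [List.range_zero, List.foldl_nil]
      rw [if_neg (by omega), List.getD_eq_getElem?_getD]
      simp [hj]
  | succ m ih =>
      intro hm j hj
      rw [List.range_succ, List.foldl_append, List.foldl_cons, List.foldl_nil]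
      have hlen : ((List.range m).foldl
          (fun sl i => if arr.getD i 0 = (i : Int) + 1 then sl.set (arr.length - i - 1) ((i : Int) + 1) else sl)
          (List.replicate arr.length (0 : Int))).length = arr.length := by
        rw [foldl_length]
        · simp
        · intro s i; split_ifs <;> simp
      by_cases hj' : j = arr.length - 1 - m
      · subst hj'
        have h1 : arr.length - 1 - (arr.length - 1 - m) = m := by omega
        have h2 : arr.length - (arr.length - 1 - m) = m + 1 := by omega
        by_cases ha : arr.getD m 0 = (m : Int) + 1
        · have hidx : arr.length - m - 1 = arr.length - 1 - m := by omega
          rw [if_pos ha, hidx, getD_set_self, hlen, if_pos (by omega), h1, h2]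
          rw [if_pos ⟨(by omega : arr.length - (m + 1) ≤ arr.length - 1 - m),
                (by push_cast; exact ha : arr.getD m 0 = ((m + 1 : Nat) : Int))⟩]
          push_cast; ring
        · rw [if_neg ha, ih (by omega) _ (by omega)]
          rw [if_neg (by rintro ⟨h3, h4⟩; omega),
            if_neg (by rintro ⟨h3, h4⟩; rw [h1, h2] at h4; push_cast at h4; exact ha h4)]
      · have key : (if arr.getD m 0 = (m : Int) + 1
            then ((List.range m).foldl
              (fun sl i => if arr.getD i 0 = (i : Int) + 1 then sl.set (arr.length - i - 1) ((i : Int) + 1) else sl)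
              (List.replicate arr.length (0 : Int))).set (arr.length - m - 1) ((m : Int) + 1)
            else ((List.range m).foldl
              (fun sl i => if arr.getD i 0 = (i : Int) + 1 then sl.set (arr.length - i - 1) ((i : Int) + 1) else sl)
              (List.replicate arr.length (0 : Int)))).getD j 0
            = ((List.range m).foldl
              (fun sl i => if arr.getD i 0 = (i : Int) + 1 then sl.set (arr.length - i - 1) ((i : Int) + 1) else sl)
              (List.replicate arr.length (0 : Int))).getD j 0 := by
          split_ifs
          · exact getD_set_ne _ _ _ _ (by omega)
          · rfl
        rw [key, ih (by omega) _ hj]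
        by_cases hc : arr.getD (arr.length - 1 - j) 0 = ((arr.length - j : Nat) : Int)
        · by_cases hb : arr.length - (m + 1) ≤ j
          · have hb' : arr.length - m ≤ j := by omega
            rw [if_pos ⟨hb', hc⟩, if_pos ⟨hb, hc⟩]
          · rw [if_neg (by rintro ⟨h3, _⟩; omega), if_neg (by rintro ⟨h3, _⟩; omega)]
        · rw [if_neg (by rintro ⟨_, h4⟩; exact hc h4), if_neg (by rintro ⟨_, h4⟩; exact hc h4)]

-- one step of the second pass pushes Rf's window one to the left
theorem Rf_step2 (s : List Int) (m : Nat) :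
    ∀ (d j : Nat), j + d = m →
      Rf (if s.getD m 0 = 0 then s.set m (s.getD (m + 1) 0) else s) j d = Rf s j (d + 1) := by
  intro d
  induction d with
  | zero =>
      intro j hj
      subst hj
      show (if s.getD (j + 0) 0 = 0 then s.set (j + 0) (s.getD (j + 0 + 1) 0) else s).getD j 0
            = Rf s j 1
      simp only [Nat.add_zero]
      have hRf : Rf s j 1 = if s.getD j 0 ≠ 0 then s.getD j 0 else s.getD (j + 1) 0 := rfl
      by_cases h : s.getD j 0 = 0
      · rw [if_pos h, getD_set_self, hRf,
          if_neg (not_not_intro h)]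
        by_cases hl : j < s.length
        · rw [if_pos hl]
        · rw [if_neg hl, h, getD_ge_length s (j + 1) (by omega)]
      · rw [if_neg h, hRf, if_pos h]
  | succ d ih =>
      intro j hj
      unfold Rf
      have hne : j ≠ m := by omega
      rw [show (if s.getD m 0 = 0 then s.set m (s.getD (m + 1) 0) else s).getD j 0 = s.getD j 0 by
        split_ifs with hc
        · exact getD_set_ne _ _ _ _ hne
        · rfl]
      rw [ih (j + 1) (by omega)]

-- characterisation of A's second pass
theorem pass2_getD (m : Nat) : ∀ (s : List Int) (j : Nat),
    (((List.range m).reverse).foldl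
      (fun sl i => if sl.getD i 0 = 0 then sl.set i (sl.getD (i + 1) 0) else sl) s).getD j 0
    = if j < m then Rf s j (m - j) else s.getD j 0 := by
  induction m with
  | zero => intro s j; simp
  | succ m ih =>
      intro s j
      rw [List.range_succ, List.reverse_append]
      simp only [List.reverse_singleton, List.singleton_append, List.foldl_cons]
      rw [ih]
      by_cases hj : j < m
      · rw [if_pos hj, if_pos (show j < m + 1 by omega),
          show m + 1 - j = (m - j) + 1 from by omega,
          ← Rf_step2 s m (m - j) j (by omega)]
      · by_cases hj' : j = m
        · rw [if_neg hj, if_pos (show j < m + 1 by omega), hj',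
            show m + 1 - m = 1 from by omega]
          exact Rf_step2 s m 0 m (by omega)
        · rw [if_neg hj, if_neg (show ¬j < m + 1 by omega)]
          by_cases hc : s.getD m 0 = 0
          · rw [if_pos hc]
            exact getD_set_ne _ _ _ _ (by omega)
          · rw [if_neg hc]

-- the bridge: A's smeared array coincides with B's forward carry, read backwards
theorem bridge (arr : List Int) : ∀ (k j : Nat), j + k + 1 = arr.length →
    Rf ((List.range arr.length).foldl
      (fun sl i => if arr.getD i 0 = (i : Int) + 1 then sl.set (arr.length - i - 1) ((i : Int) + 1) else sl)
      (List.replicate arr.length (0 : Int))) j k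
    = (scanGo arr 0 0).getD k 0 := by
  intro k
  induction k with
  | zero =>
      intro j hj
      unfold Rf
      rw [pass1_getD arr arr.length (by omega) j (by omega)]
      match arr, hj with
      | v :: t, hj =>
        have h1 : (v :: t).length - 1 - j = 0 := by omega
        have h2 : (v :: t).length - j = 1 := by omega
        have e : (0 : Int) + 1 = 1 := by ring
        rw [h1, h2, scanGo_getD_zero, e]
        simp only [List.getD_cons_zero, Nat.cast_one]
        by_cases hv : v = 1
        · rw [if_pos ⟨by omega, hv⟩, if_pos hv]
        · rw [if_neg (by rintro ⟨_, h4⟩; exact hv h4), if_neg hv]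
  | succ k ih =>
      intro j hj
      unfold Rf
      rw [pass1_getD arr arr.length (by omega) j (by omega)]
      have h1 : arr.length - 1 - j = k + 1 := by omega
      have h2 : arr.length - j = k + 2 := by omega
      rw [h1, h2, ih (j + 1) (by omega)]
      rw [scanGo_getD_succ arr 0 0 k (by omega)]
      split_ifs <;> first | rfl | (push_cast at *; try omega)

theorem getD_reverse (l : List Int) (j : Nat) (h : j < l.length) :
    l.reverse.getD j 0 = l.getD (l.length - 1 - j) 0 := by
  rw [List.getD_eq_getElem l 0 (by omega), List.getD_eq_getElem l.reverse 0 (by simpa using h)]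
  rw [List.getElem_reverse]

theorem main_eq (arr : List Int) : smallLeftPrimeArray arr = smallLeftPrimeArray_alt arr := by
  rw [alt_eq_scanGo]
  unfold smallLeftPrimeArray
  have hlen1 : ((List.range arr.length).foldl
      (fun sl i => if arr.getD i 0 = (i : Int) + 1 then sl.set (arr.length - i - 1) ((i : Int) + 1) else sl)
      (List.replicate arr.length (0 : Int))).length = arr.length := by
    rw [foldl_length]
    · simp
    · intro s i; split_ifs <;> simp
  have hlen2 : (((List.range (arr.length - 1)).reverse).foldl
      (fun sl i => if sl.getD i 0 = 0 then sl.set i (sl.getD (i + 1) 0) else sl)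
      ((List.range arr.length).foldl
        (fun sl i => if arr.getD i 0 = (i : Int) + 1 then sl.set (arr.length - i - 1) ((i : Int) + 1) else sl)
        (List.replicate arr.length (0 : Int)))).length = arr.length := by
    rw [foldl_length]
    · exact hlen1
    · intro s i; split_ifs <;> simp
  apply List.ext_getElem
  · rw [hlen2, List.length_reverse, length_scanGo]
  · intro j h1 h2
    have hj : j < arr.length := by rwa [hlen2] at h1
    rw [← List.getD_eq_getElem _ 0 h1, ← List.getD_eq_getElem _ 0 h2]
    rw [getD_reverse _ j (by rw [length_scanGo]; exact hj), length_scanGo]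
    rw [pass2_getD]
    have key := bridge arr (arr.length - 1 - j) j (by omega)
    by_cases hj' : j < arr.length - 1
    · rw [if_pos hj', key]
    · rw [if_neg hj']
      have hj0 : arr.length - 1 - j = 0 := by omega
      rw [hj0] at key ⊢
      exact key

-- ===== VERDICT (by name: the statement is the Claim_ definition above) =====
theorem smallLeftPrimeArray_spec : Claim_equal_smallLeftPrimeArray := by
  intro arr _
  exact main_eq arr
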